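-- pv_equiv track=rewrite | github.com/ericyaukc0519/C-SD | industry_analysis_framework.py | _analyze_geographical_distribution
-- ===== SOURCE A (Python) =====
-- from typing import List, Dict, Tuple, Optional
--
-- def _analyze_geographical_distribution(companies: List[Dict]) -> Dict[str, Dict]:
--     """Analyze geographical distribution of companies"""
--     distribution = {}
--
--     for company in companies:
--         location = company.get('location', 'Unknown')
--         classification = company.get('classification', 'unknown')
--
--         if location not in distribution:
--             distribution[location] = {}
--
--         distribution[location][classification] = distribution[location].get(classification, 0) + 1
--
--     return distribution
-- ===== SOURCE B (Python) =====
-- from typing import List, Dict, Tuple, Optional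
--
-- def _analyze_geographical_distribution(companies: List[Dict]) -> Dict[str, Dict]:
--     """Two-pass pivot: flat (location, classification) tally, then reshape to nested dicts."""
--     flat = {}
--     for company in companies:
--         key = (company.get('location', 'Unknown'), company.get('classification', 'unknown'))
--         flat[key] = flat.get(key, 0) + 1
--
--     distribution = {}
--     for (location, classification), count in flat.items():
--         if location not in distribution:
--             distribution[location] = {}
--         distribution[location][classification] = count
--     return distribution
-- ===== Notes on version B (the rewrite author's own statement) =====
-- stated objective: alternative
-- what changed: Replaces the single pass that builds the nested dict directly with a two-pass pivot: a flat tally keyed by the (location, classification) pair, then a reshape pass over the flat table's items that creates the inner dicts.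
import Mathlib
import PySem

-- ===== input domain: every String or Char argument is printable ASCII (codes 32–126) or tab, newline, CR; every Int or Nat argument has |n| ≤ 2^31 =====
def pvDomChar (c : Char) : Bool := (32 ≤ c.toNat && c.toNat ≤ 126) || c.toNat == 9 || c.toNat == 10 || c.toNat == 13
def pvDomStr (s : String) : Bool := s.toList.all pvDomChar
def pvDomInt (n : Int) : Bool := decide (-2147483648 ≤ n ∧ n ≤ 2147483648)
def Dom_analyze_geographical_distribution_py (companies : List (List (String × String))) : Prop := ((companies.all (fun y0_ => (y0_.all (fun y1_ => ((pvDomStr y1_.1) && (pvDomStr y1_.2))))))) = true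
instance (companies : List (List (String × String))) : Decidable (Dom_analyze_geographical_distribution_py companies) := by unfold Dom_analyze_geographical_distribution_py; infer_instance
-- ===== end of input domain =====

-- B replaces A's direct nested-dict build with a two-pass pivot (flat (location, classification) tally, then reshape); alternative decomposition, same cost.


-- ===== PORT A =====
-- company.get(k, dflt): first-match lookup in the association list (the dict convention)
def pvGetField (company : List (String × String)) (k dflt : String) : String :=
  (List.lookup k company).getD dflt

-- the body of A's loop: ensure distribution[location] exists, then bump the inner count
def pvStepA (dist : PySem.Dict String (PySem.Dict String Int)) (company : List (String × String)) :
    PySem.Dict String (PySem.Dict String Int) :=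
  let location := pvGetField company "location" "Unknown"
  let classification := pvGetField company "classification" "unknown"
  let dist := if dist.contains location then dist else dist.insert location PySem.Dict.empty
  let inner := dist.getD location PySem.Dict.empty   -- distribution[location]: present after the ensure step
  dist.insert location (inner.insert classification (inner.getD classification 0 + 1))

def analyze_geographical_distribution_py (companies : List (List (String × String))) :
    List (String × List (String × Int)) :=
  ((companies.foldl pvStepA PySem.Dict.empty).items.map (fun p => (p.1, p.2.items)))

-- ===== PORT B =====
-- first pass: flat tally keyed by the (location, classification) pair
def pvFlat (companies : List (List (String × String))) : PySem.Dict (String × String) Int :=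
  companies.foldl
    (fun d company =>
      let key := (pvGetField company "location" "Unknown", pvGetField company "classification" "unknown")
      d.insert key (d.getD key 0 + 1))
    PySem.Dict.empty

-- second pass body: place one flat entry ((location, classification), count) into the nested dict
def pvStepB (dist : PySem.Dict String (PySem.Dict String Int)) (p : (String × String) × Int) :
    PySem.Dict String (PySem.Dict String Int) :=
  let dist := if dist.contains p.1.1 then dist else dist.insert p.1.1 PySem.Dict.empty
  dist.insert p.1.1 ((dist.getD p.1.1 PySem.Dict.empty).insert p.1.2 p.2)

def analyze_geographical_distribution_py_alt (companies : List (List (String × String))) :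
    List (String × List (String × Int)) :=
  (((pvFlat companies).items.foldl pvStepB PySem.Dict.empty).items.map (fun p => (p.1, p.2.items)))

-- ===== PRECONDITION & SPEC =====
def Spec_analyze_geographical_distribution_py (companies : List (List (String × String))) (out : List (String × List (String × Int))) : Prop := out = analyze_geographical_distribution_py_alt companies
instance (companies : List (List (String × String))) (out : List (String × List (String × Int))) : Decidable (Spec_analyze_geographical_distribution_py companies out) := by unfold Spec_analyze_geographical_distribution_py; infer_instance

-- ===== CLAIM (what is proved, stated in full; the proofs are below) =====
def Claim_equal_analyze_geographical_distribution_py : Prop := ∀ (companies : List (List (String × String))), Dom_analyze_geographical_distribution_py companies → Spec_analyze_geographical_distribution_py companies (analyze_geographical_distribution_py companies)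

-- ===== LEMMAS AND PROOFS =====

-- the (location, classification) key of one company row
def pvKey (company : List (String × String)) : String × String :=
  (pvGetField company "location" "Unknown", pvGetField company "classification" "unknown")

theorem pvStepA_closed (d : PySem.Dict String (PySem.Dict String Int)) (c : List (String × String)) :
    pvStepA d c = d.insert (pvKey c).1
      (((d.getD (pvKey c).1 PySem.Dict.empty)).insert (pvKey c).2
        ((d.getD (pvKey c).1 PySem.Dict.empty).getD (pvKey c).2 0 + 1)) := by
  by_cases h : d.contains (pvGetField c "location" "Unknown") = true
  · simp [pvStepA, pvKey, h]
  · have h' : d.contains (pvGetField c "location" "Unknown") = false := by simpa using h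
    have hge : d.getD (pvGetField c "location" "Unknown") PySem.Dict.empty = PySem.Dict.empty :=
      PySem.Dict.getD_of_not_contains _ _ h'
    simp [pvStepA, pvKey, h', hge, PySem.Dict.getD_insert_self, PySem.Dict.insert_insert_self]

theorem pvStepB_closed (d : PySem.Dict String (PySem.Dict String Int)) (p : (String × String) × Int) :
    pvStepB d p = d.insert p.1.1
      ((d.getD p.1.1 PySem.Dict.empty).insert p.1.2 p.2) := by
  by_cases h : d.contains p.1.1 = true
  · simp [pvStepB, h]
  · have h' : d.contains p.1.1 = false := by simpa using h
    have hge : d.getD p.1.1 PySem.Dict.empty = PySem.Dict.empty :=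
      PySem.Dict.getD_of_not_contains _ _ h'
    simp [pvStepB, h', hge, PySem.Dict.getD_insert_self, PySem.Dict.insert_insert_self]

theorem getD_foldA (cs : List (List (String × String))) (d : PySem.Dict String (PySem.Dict String Int)) (l : String) :
    (cs.foldl pvStepA d).getD l PySem.Dict.empty
      = ((cs.filter (fun c => (pvKey c).1 == l)).map (fun c => (pvKey c).2)).foldl
          (fun inner x => inner.insert x (inner.getD x 0 + 1)) (d.getD l PySem.Dict.empty) := by
  induction cs generalizing d with
  | nil => simp
  | cons c cs ih =>
    rw [List.foldl_cons, ih, pvStepA_closed]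
    by_cases hc : (pvKey c).1 = l
    · simp [hc]
    · have hc' : ¬(l = (pvKey c).1) := fun e => hc e.symm
      simp [hc, hc', PySem.Dict.getD_insert]

theorem getD_foldB (ps : List ((String × String) × Int)) (d : PySem.Dict String (PySem.Dict String Int)) (l : String) :
    (ps.foldl pvStepB d).getD l PySem.Dict.empty
      = (ps.filter (fun p => p.1.1 == l)).foldl
          (fun inner p => inner.insert p.1.2 p.2) (d.getD l PySem.Dict.empty) := by
  induction ps generalizing d with
  | nil => simp
  | cons p ps ih =>
    rw [List.foldl_cons, ih, pvStepB_closed]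
    by_cases hc : p.1.1 = l
    · simp [hc]
    · have hc' : ¬(l = p.1.1) := fun e => hc e.symm
      simp [hc, hc', PySem.Dict.getD_insert]

-- dedup of a mapped dedup is dedup of the map
theorem ofList_map_ofList {α β : Type} [BEq α] [LawfulBEq α] [BEq β] [LawfulBEq β] (f : α → β) (xs : List α) :
    PySem.Set.ofList ((PySem.Set.ofList xs).map f) = PySem.Set.ofList (xs.map f) := by
  induction xs using List.reverseRecOn with
  | nil => rfl
  | append_singleton xs x ih =>
    rw [PySem.Set.ofList_append_singleton, List.map_append, List.map_singleton,
      PySem.Set.ofList_append_singleton, ← ih]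
    by_cases hx : x ∈ PySem.Set.ofList xs
    · rw [PySem.Set.add_of_mem hx, PySem.Set.add_of_mem]
      exact (PySem.Set.mem_ofList _ _).mpr (List.mem_map_of_mem hx)
    · rw [PySem.Set.add_of_not_mem hx, List.map_append, List.map_singleton,
        PySem.Set.ofList_append_singleton]

-- restricting the dedup'd pair list to one first component is the dedup of the second components, tagged back
theorem ofList_filter_fst {α β : Type} [BEq α] [LawfulBEq α] [BEq β] [LawfulBEq β] (ps : List (α × β)) (l : α) :
    (PySem.Set.ofList ps).filter (fun p => p.1 == l)
      = (PySem.Set.ofList ((ps.filter (fun p => p.1 == l)).map (fun p => p.2))).map (fun c => (l, c)) := by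
  induction ps using List.reverseRecOn with
  | nil => rfl
  | append_singleton ps p ih =>
    rw [PySem.Set.ofList_append_singleton]
    by_cases hpl : p.1 = l
    · have hfp : List.filter (fun (p : α × β) => p.1 == l) [p] = [p] := by simp [hpl]
      rw [List.filter_append, hfp, List.map_append, List.map_singleton,
        PySem.Set.ofList_append_singleton]
      by_cases hp : p ∈ PySem.Set.ofList ps
      · have hp2 : p.2 ∈ (ps.filter (fun p => p.1 == l)).map (fun p => p.2) :=
          List.mem_map_of_mem (List.mem_filter.mpr ⟨(PySem.Set.mem_ofList _ _).mp hp, by simp [hpl]⟩)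
        rw [PySem.Set.add_of_mem hp, PySem.Set.add_of_mem ((PySem.Set.mem_ofList _ _).mpr hp2), ih]
      · have hp2 : p.2 ∉ PySem.Set.ofList ((ps.filter (fun p => p.1 == l)).map (fun p => p.2)) := by
          intro hmem
          rcases List.mem_map.mp ((PySem.Set.mem_ofList _ _).mp hmem) with ⟨q, hq, hq2⟩
          have hq1 : q.1 = l := by simpa using (List.mem_filter.mp hq).2
          have hqp : q = p := Prod.ext (by rw [hq1, hpl]) (by rw [hq2])
          exact hp ((PySem.Set.mem_ofList _ _).mpr (hqp ▸ (List.mem_filter.mp hq).1))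
        have hpp : (l, p.2) = p := Prod.ext (by rw [hpl]) rfl
        rw [PySem.Set.add_of_not_mem hp, PySem.Set.add_of_not_mem hp2, List.filter_append, hfp,
          ih, List.map_append, List.map_singleton, hpp]
    · have hfp : List.filter (fun (p : α × β) => p.1 == l) [p] = [] := by simp [hpl]
      by_cases hp : p ∈ PySem.Set.ofList ps
      · rw [PySem.Set.add_of_mem hp, List.filter_append, hfp, List.append_nil, ih]
      · rw [PySem.Set.add_of_not_mem hp, List.filter_append, List.filter_append, hfp,
          List.append_nil, List.append_nil, ih]

theorem count_pair {α β : Type} [BEq α] [LawfulBEq α] [BEq β] [LawfulBEq β] (ps : List (α × β)) (l : α) (c : β) :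
    ps.count (l, c) = ((ps.filter (fun p => p.1 == l)).map (fun p => p.2)).count c := by
  induction ps with
  | nil => rfl
  | cons p ps ih =>
    by_cases h1 : p.1 = l
    · by_cases h2 : p.2 = c
      · have hp : p = (l, c) := Prod.ext (by rw [h1]) (by rw [h2])
        simp [hp, ih]
      · have hp : ¬(p = (l, c)) := fun e => h2 (by rw [e])
        simp [h1, h2, hp, ih]
    · have hp : ¬(p = (l, c)) := fun e => h1 (by rw [e])
      simp [h1, hp, ih]

theorem pvStepA_fun_eq : pvStepA = fun d c => d.insert (pvKey c).1
    (((d.getD (pvKey c).1 PySem.Dict.empty)).insert (pvKey c).2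
      ((d.getD (pvKey c).1 PySem.Dict.empty).getD (pvKey c).2 0 + 1)) :=
  funext fun d => funext fun c => pvStepA_closed d c

theorem pvStepB_fun_eq : pvStepB = fun d p => d.insert p.1.1
    ((d.getD p.1.1 PySem.Dict.empty).insert p.1.2 p.2) :=
  funext fun d => funext fun p => pvStepB_closed d p

theorem pvFlat_eq_counter (companies : List (List (String × String))) :
    pvFlat companies = PySem.Dict.counter (companies.map pvKey) := by
  rw [← PySem.Dict.foldl_insert_getD_add_one_eq_counter, List.foldl_map]
  rfl

theorem foldl_insert_count_eq_counter (xs : List String) :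
    (PySem.Set.ofList xs).foldl (fun (d : PySem.Dict String Int) c => d.insert c ((xs.count c : Int)))
        PySem.Dict.empty
      = PySem.Dict.counter xs := by
  apply PySem.Dict.ext
  rw [PySem.Dict.items_counter]
  have h := PySem.Dict.items_foldl_insert_fresh (PySem.Set.ofList xs) (fun c => c)
    (fun c => ((xs.count c : Int))) PySem.Dict.empty (by simp)
    (by simp [PySem.Set.nodup_ofList])
  simpa using h

theorem getD_nestedA (companies : List (List (String × String))) (l : String) :
    (companies.foldl pvStepA PySem.Dict.empty).getD l PySem.Dict.empty
      = PySem.Dict.counter ((companies.filter (fun c => (pvKey c).1 == l)).map (fun c => (pvKey c).2)) := by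
  rw [getD_foldA, PySem.Dict.getD_empty, PySem.Dict.foldl_insert_getD_add_one_eq_counter]

theorem getD_nestedB (companies : List (List (String × String))) (l : String) :
    ((pvFlat companies).items.foldl pvStepB PySem.Dict.empty).getD l PySem.Dict.empty
      = PySem.Dict.counter ((companies.filter (fun c => (pvKey c).1 == l)).map (fun c => (pvKey c).2)) := by
  rw [getD_foldB, PySem.Dict.getD_empty, pvFlat_eq_counter, PySem.Dict.items_counter, List.filter_map]
  have hcomp : ((fun (p : (String × String) × Int) => p.1.1 == l)
        ∘ (fun k => (k, ((companies.map pvKey).count k : Int))))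
      = fun k => k.1 == l := rfl
  rw [hcomp, ofList_filter_fst, List.map_map, List.foldl_map]
  have hcsl : (((companies.map pvKey).filter (fun p => p.1 == l)).map (fun p => p.2))
      = ((companies.filter (fun c => (pvKey c).1 == l)).map (fun c => (pvKey c).2)) := by
    rw [List.filter_map, List.map_map]; rfl
  have hfun : (fun (inner : PySem.Dict String Int) (c : String) =>
        inner.insert (((fun k => (k, ((companies.map pvKey).count k : Int))) ∘ (fun c => (l, c))) c).1.2
          (((fun k => (k, ((companies.map pvKey).count k : Int))) ∘ (fun c => (l, c))) c).2)
      = fun (inner : PySem.Dict String Int) (c : String) =>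
          inner.insert c ((((companies.filter (fun c => (pvKey c).1 == l)).map (fun c => (pvKey c).2)).count c : Int)) := by
    funext inner c
    simp only [Function.comp]
    rw [count_pair, hcsl]
  rw [hfun, hcsl, foldl_insert_count_eq_counter]

theorem nested_eq (companies : List (List (String × String))) :
    companies.foldl pvStepA PySem.Dict.empty
      = (pvFlat companies).items.foldl pvStepB PySem.Dict.empty := by
  have hndA : (companies.foldl pvStepA PySem.Dict.empty).keys.Nodup := by
    rw [pvStepA_fun_eq]
    exact PySem.Dict.nodup_keys_foldl_insert_key _ (fun c => (pvKey c).1) _ _ (by simp)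
  have hndB : ((pvFlat companies).items.foldl pvStepB PySem.Dict.empty).keys.Nodup := by
    rw [pvStepB_fun_eq]
    exact PySem.Dict.nodup_keys_foldl_insert_key _ (fun (p : (String × String) × Int) => p.1.1) _ _ (by simp)
  have hkA : (companies.foldl pvStepA PySem.Dict.empty).keys
      = PySem.Set.ofList (companies.map (fun c => (pvKey c).1)) := by
    rw [pvStepA_fun_eq, PySem.Dict.keys_foldl_insert_key]
    simp [PySem.Set.update_nil_left]
  have hkB : ((pvFlat companies).items.foldl pvStepB PySem.Dict.empty).keys
      = PySem.Set.ofList (companies.map (fun c => (pvKey c).1)) := by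
    rw [pvStepB_fun_eq, PySem.Dict.keys_foldl_insert_key]
    rw [pvFlat_eq_counter, PySem.Dict.items_counter, List.map_map]
    have hcomp : ((fun (p : (String × String) × Int) => p.1.1)
        ∘ (fun k => (k, ((companies.map pvKey).count k : Int)))) = fun (k : String × String) => k.1 := rfl
    rw [hcomp]
    simp only [PySem.Dict.keys_empty]
    rw [PySem.Set.update_nil_left, ofList_map_ofList, List.map_map]
    rfl
  apply PySem.Dict.ext
  rw [PySem.Dict.items_eq_map_keys _ hndA PySem.Dict.empty,
    PySem.Dict.items_eq_map_keys _ hndB PySem.Dict.empty, hkA, hkB]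
  refine List.map_congr_left (fun k _ => ?_)
  rw [getD_nestedA, getD_nestedB]

-- ===== VERDICT (by name: the statement is the Claim_ definition above) =====
theorem analyze_geographical_distribution_py_spec : Claim_equal_analyze_geographical_distribution_py := by
  intro companies _
  unfold Spec_analyze_geographical_distribution_py analyze_geographical_distribution_py
    analyze_geographical_distribution_py_alt
  rw [nested_eq]
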